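-- pv_equiv track=rewrite | github.com/1ncompleteness/Pizza-Slice-Instant-Insanity | pizza_insanity.py | minimal_obstacle
-- ===== SOURCE A (Python) =====
-- from itertools import combinations
--
-- def rotations(t):
--     return [(t[0],t[1],t[2]), (t[1],t[2],t[0]), (t[2],t[0],t[1])]
--
-- def minimal_obstacle(slices):
--     for sz in range(2, len(slices)+1):
--         for combo in combinations(range(len(slices)), sz):
--             sub = [slices[i] for i in combo]
--
--             def bt(idx, cols):
--                 if idx == len(sub):
--                     return True
--                 for r in rotations(sub[idx]):
--                     ok = all(r[j] not in cols[j] for j in range(3))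
--                     if ok:
--                         for j in range(3):
--                             cols[j].add(r[j])
--                         if bt(idx+1, cols):
--                             return True
--                         for j in range(3):
--                             cols[j].remove(r[j])
--                 return False
--
--             if not bt(0, [set(), set(), set()]):
--                 return combo, sub
--     return None, None
-- ===== SOURCE B (Python) =====
-- from itertools import combinations
--
-- def rotations(t):
--     return [(t[0], t[1], t[2]), (t[1], t[2], t[0]), (t[2], t[0], t[1])]
--
-- def minimal_obstacle(slices):
--     n = len(slices)
--     for sz in range(2, n + 1):
--         for combo in combinations(range(n), sz):
--             sub = [slices[i] for i in combo]
--             stack = [(0, [])]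
--             feasible = False
--             while stack:
--                 idx, asg = stack.pop()
--                 if idx == len(sub):
--                     feasible = True
--                     break
--                 for r in rotations(sub[idx]):
--                     if all(r[0] != a[0] and r[1] != a[1] and r[2] != a[2] for a in asg):
--                         stack.append((idx + 1, asg + [r]))
--             if not feasible:
--                 return combo, sub
--     return None, None
-- ===== Notes on version B (the rewrite author's own statement) =====
-- stated objective: alternative
-- what changed: Replaced the nested recursive bt closure that mutates and un-mutates three per-column sets by an iterative explicit-stack DFS over immutable partial assignments, testing a candidate rotation by scanning the chosen prefix instead of set membership.
import Mathlib
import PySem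

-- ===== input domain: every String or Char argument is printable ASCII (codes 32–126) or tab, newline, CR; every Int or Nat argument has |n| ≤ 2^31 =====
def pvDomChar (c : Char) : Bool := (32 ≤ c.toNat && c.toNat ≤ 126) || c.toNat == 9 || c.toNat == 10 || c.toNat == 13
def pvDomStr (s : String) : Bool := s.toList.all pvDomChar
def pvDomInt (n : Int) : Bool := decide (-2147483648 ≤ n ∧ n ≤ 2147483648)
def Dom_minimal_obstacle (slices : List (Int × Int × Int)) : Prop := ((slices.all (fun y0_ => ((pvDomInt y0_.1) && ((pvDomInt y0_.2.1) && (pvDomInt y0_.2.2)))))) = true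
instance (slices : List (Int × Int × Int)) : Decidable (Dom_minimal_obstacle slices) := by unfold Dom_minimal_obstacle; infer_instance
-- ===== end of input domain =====

-- B replaces A's recursive bt closure (mutable per-column sets with add/remove backtracking) by an
-- iterative explicit-stack DFS over immutable partial assignments, testing a rotation by scanning the
-- prefix chosen so far (objective: alternative decomposition, no speed claim).

-- ===== PORT A =====
-- shared helper: rotations(t) (the same helper appears in Source A and Source B)
def rotations (t : Int × Int × Int) : List (Int × Int × Int) :=
  [(t.1, t.2.1, t.2.2), (t.2.1, t.2.2, t.1), (t.2.2, t.1, t.2.1)]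

-- shared helper: itertools.combinations(l, k) in Python's order (both sources call it)
def combinations (l : List Nat) (k : Nat) : List (List Nat) :=
  match l, k with
  | _, 0 => [[]]
  | [], _ + 1 => []
  | x :: xs, k + 1 => (combinations xs k).map (x :: ·) ++ combinations xs (k + 1)

-- A's inner bt(idx, cols): recursion over the remaining suffix sub[idx:], carrying the three column
-- sets; the add/remove pair that restores cols on backtrack becomes the purely local Set.add here.
def btA : List (Int × Int × Int) → PySem.Set Int → PySem.Set Int → PySem.Set Int → Bool
  | [], _, _, _ => true
  | t :: rest, c0, c1, c2 =>
    (rotations t).any fun r =>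
      (!(PySem.Set.contains c0 r.1) && !(PySem.Set.contains c1 r.2.1) && !(PySem.Set.contains c2 r.2.2)) &&
      btA rest (PySem.Set.add c0 r.1) (PySem.Set.add c1 r.2.1) (PySem.Set.add c2 r.2.2)

def minimal_obstacle (slices : List (Int × Int × Int)) : Option (List Int) × (Option (List (Int × Int × Int))) :=
  match (List.range' 2 (slices.length - 1)).findSome? (fun sz =>
      (combinations (List.range slices.length) sz).findSome? (fun combo =>
        let sub := combo.map (fun i => slices.getD i (0, 0, 0))
        if btA sub PySem.Set.empty PySem.Set.empty PySem.Set.empty then none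
        else some (combo.map Int.ofNat, sub))) with
  | some (c, s) => (some c, some s)
  | none => (none, none)

-- ===== PORT B =====
-- all(r[0] != a[0] and r[1] != a[1] and r[2] != a[2] for a in asg)
def noConflict (r : Int × Int × Int) (asg : List (Int × Int × Int)) : Bool :=
  asg.all fun a => r.1 != a.1 && r.2.1 != a.2.1 && r.2.2 != a.2.2

-- Source B's while-loop over `stack` (the flag/break becomes the Bool result). A stack entry (idx, asg)
-- is carried as (sub[idx:], asg) — the suffix stands for the index; Python's list end (append/pop)
-- is the head of the Lean list, so the three appends become a reversed block consed in front.
def dfsB (stack : List (List (Int × Int × Int) × List (Int × Int × Int))) : Bool :=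
  match stack with
  | [] => false
  | (rest, asg) :: stk =>
    match rest with
    | [] => true
    | t :: rest' =>
      dfsB ((((rotations t).filter (fun r => noConflict r asg)).map
        (fun r => (rest', asg ++ [r]))).reverse ++ stk)
termination_by (stack.map (fun e => 4 ^ e.1.length)).sum
decreasing_by
  simp only [List.map_append, List.sum_append, List.map_reverse, List.sum_reverse, List.map_map,
    List.map_cons, List.sum_cons, Function.comp_def, List.length_cons, List.map_const',
    List.sum_replicate, smul_eq_mul]
  have hcount : (((rotations t).filter (fun r => noConflict r asg)).length) ≤ 3 := by
    have := List.length_filter_le (fun r => noConflict r asg) (rotations t)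
    simpa [rotations] using this
  have hpos : 1 ≤ (4 : Nat) ^ rest'.length := Nat.one_le_pow _ _ (by norm_num)
  have hmul : (((rotations t).filter (fun r => noConflict r asg)).length) * 4 ^ rest'.length ≤
      3 * 4 ^ rest'.length := Nat.mul_le_mul_right _ hcount
  omega

def minimal_obstacle_alt (slices : List (Int × Int × Int)) : Option (List Int) × (Option (List (Int × Int × Int))) :=
  match (List.range' 2 (slices.length - 1)).findSome? (fun sz =>
      (combinations (List.range slices.length) sz).findSome? (fun combo =>
        let sub := combo.map (fun i => slices.getD i (0, 0, 0))
        let feasible := dfsB [(sub, [])]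
        if feasible then none else some (combo.map Int.ofNat, sub))) with
  | some (c, s) => (some c, some s)
  | none => (none, none)

-- ===== PRECONDITION & SPEC =====
def Spec_minimal_obstacle (slices : List (Int × Int × Int)) (out : Option (List Int) × (Option (List (Int × Int × Int)))) : Prop := out = minimal_obstacle_alt slices
instance (slices : List (Int × Int × Int)) (out : Option (List Int) × (Option (List (Int × Int × Int)))) : Decidable (Spec_minimal_obstacle slices out) := by unfold Spec_minimal_obstacle; infer_instance

-- ===== CLAIM (what is proved, stated in full; the proofs are below) =====
def Claim_equal_minimal_obstacle : Prop := ∀ (slices : List (Int × Int × Int)), Dom_minimal_obstacle slices → Spec_minimal_obstacle slices (minimal_obstacle slices)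

-- ===== LEMMAS AND PROOFS =====

lemma findSome?_congr_mem {α β : Type} (l : List α) (f g : α → Option β)
    (h : ∀ a ∈ l, f a = g a) : l.findSome? f = l.findSome? g := by
  induction l with
  | nil => rfl
  | cons x xs ih =>
    simp only [List.findSome?_cons, h x (by simp)]
    cases g x with
    | none => exact ih (fun a ha => h a (by simp [ha]))
    | some b => rfl

-- Source B's freshness test equals A's three set-membership tests against the columns of the prefix
lemma noConflict_eq (r : Int × Int × Int) (asg : List (Int × Int × Int)) :
    noConflict r asg =
      (!(PySem.Set.contains (asg.map (·.1)) r.1) &&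
       !(PySem.Set.contains (asg.map (·.2.1)) r.2.1) &&
       !(PySem.Set.contains (asg.map (·.2.2)) r.2.2)) := by
  rw [Bool.eq_iff_iff]
  simp only [noConflict, List.all_eq_true, Bool.and_eq_true, bne_iff_ne, Bool.not_eq_true',
    PySem.Set.contains, List.contains_eq_mem, decide_eq_false_iff_not, List.mem_map]
  constructor
  · intro h
    refine ⟨⟨?_, ?_⟩, ?_⟩
    · rintro ⟨a, ha, hv⟩; exact (h a ha).1.1 hv.symm
    · rintro ⟨a, ha, hv⟩; exact (h a ha).1.2 hv.symm
    · rintro ⟨a, ha, hv⟩; exact (h a ha).2 hv.symm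
  · rintro ⟨⟨h0, h1⟩, h2⟩ a ha
    exact ⟨⟨fun he => h0 ⟨a, ha, he.symm⟩, fun he => h1 ⟨a, ha, he.symm⟩⟩,
      fun he => h2 ⟨a, ha, he.symm⟩⟩

-- the stack machine computes "some entry has a valid completion", which is A's bt on that entry
lemma dfsB_eq_any (stack : List (List (Int × Int × Int) × List (Int × Int × Int))) :
    dfsB stack = stack.any (fun e => btA e.1 (e.2.map (·.1)) (e.2.map (·.2.1)) (e.2.map (·.2.2))) := by
  fun_induction dfsB stack with
  | case1 => rfl
  | case2 asg stk => simp [btA]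
  | case3 asg stk t rest' ih =>
    rw [ih]
    simp only [List.any_append, List.any_reverse, List.any_map, List.any_cons]
    congr 1
    simp only [btA, List.any_filter, Function.comp_def]
    refine PySem.List.any_congr_mem (fun r _ => ?_)
    rw [noConflict_eq]
    simp only [PySem.Set.contains, List.contains_eq_mem, PySem.Set.add]
    by_cases hm0 : r.1 ∈ asg.map (·.1)
    · simp [hm0]
    · by_cases hm1 : r.2.1 ∈ asg.map (·.2.1)
      · simp [hm1]
      · by_cases hm2 : r.2.2 ∈ asg.map (·.2.2)
        · simp [hm2]
        · simp [hm0, hm1, hm2]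

-- ===== VERDICT (by name: the statement is the Claim_ definition above) =====
theorem minimal_obstacle_spec : Claim_equal_minimal_obstacle := by
  intro slices _
  unfold Spec_minimal_obstacle minimal_obstacle minimal_obstacle_alt
  have hmain : ∀ sz ∈ List.range' 2 (slices.length - 1),
      (combinations (List.range slices.length) sz).findSome? (fun combo =>
        let sub := combo.map (fun i => slices.getD i (0, 0, 0))
        if btA sub PySem.Set.empty PySem.Set.empty PySem.Set.empty then none
        else some (combo.map Int.ofNat, sub)) =
      (combinations (List.range slices.length) sz).findSome? (fun combo =>
        let sub := combo.map (fun i => slices.getD i (0, 0, 0))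
        let feasible := dfsB [(sub, [])]
        if feasible then none else some (combo.map Int.ofNat, sub)) := by
    intro sz _
    refine findSome?_congr_mem _ _ _ (fun combo _ => ?_)
    have h := dfsB_eq_any [(combo.map (fun i => slices.getD i (0, 0, 0)), [])]
    simp only [List.any_cons, List.any_nil, List.map_nil, Bool.or_false] at h
    simp only [h, PySem.Set.empty]
    rfl
  rw [findSome?_congr_mem _ _ _ hmain]
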